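-- pv_equiv track=rewrite | github.com/codeandroo/stancode-projects | SC101 (advanced) Part II/SC101_Assignment5/boggle.py | check_format
-- ===== SOURCE A (Python) =====
-- def check_format(word):
--     """
--     :param word: str, allow the user to enter a string
--     :return: bool, return True or False depending on the format
--     """
--     if len(word) > 7:
--         return False
--     else:
--         for i in range(len(word)):
--             if i % 2 == 0:
--                 if not word[i].isalpha():
--                     return False
--             else:
--                 if word[i] != ' ':
--                     return False
--         return True
-- ===== SOURCE B (Python) =====
-- def check_format(word):
--     """Pairwise recursion: consume (letter, space) pairs instead of an indexed parity scan."""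
--     def ok(s):
--         if not s:
--             return True
--         if not s[0].isalpha():
--             return False
--         if len(s) == 1:
--             return True
--         return s[1] == ' ' and ok(s[2:])
--     return len(word) <= 7 and ok(word)
-- ===== Notes on version B (the rewrite author's own statement) =====
-- stated objective: simpler
-- what changed: Replaces A's indexed loop with a parity test on each position by a structural recursion that consumes the string two characters (letter, space) at a time after a single length guard.
import Mathlib
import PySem

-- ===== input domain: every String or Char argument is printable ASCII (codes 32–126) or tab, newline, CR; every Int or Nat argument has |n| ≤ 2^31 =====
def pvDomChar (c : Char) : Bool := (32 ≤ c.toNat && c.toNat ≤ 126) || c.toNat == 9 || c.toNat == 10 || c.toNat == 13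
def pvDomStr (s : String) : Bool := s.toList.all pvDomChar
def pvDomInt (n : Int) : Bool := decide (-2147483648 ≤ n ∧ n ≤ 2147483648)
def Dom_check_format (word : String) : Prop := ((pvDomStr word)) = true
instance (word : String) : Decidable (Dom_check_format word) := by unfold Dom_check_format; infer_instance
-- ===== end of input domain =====

-- B is simpler: a structural recursion consuming (letter, space) pairs instead of A's indexed parity scan.

-- ===== PORT A =====
-- the 'for i in range(len(word))' loop with its early returns, as index recursion
def checkLoopA (cs : List Char) (i : Nat) : Bool :=
  if h : i < cs.length then
    if i % 2 == 0 then
      if !PySem.Chars.isalpha cs[i] then false else checkLoopA cs (i + 1)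
    else
      if cs[i] != ' ' then false else checkLoopA cs (i + 1)
  else true
termination_by cs.length - i

def check_format (word : String) : Bool :=
  if PySem.Str.len word > 7 then false
  else checkLoopA word.toList 0

-- ===== PORT B =====
-- Source B's helper ok(s): two characters at a time
def okAlt : List Char → Bool
  | [] => true
  | [c] => PySem.Chars.isalpha c
  | c :: d :: rest => PySem.Chars.isalpha c && (d == ' ' && okAlt rest)

def check_format_alt (word : String) : Bool :=
  decide (PySem.Str.len word ≤ 7) && okAlt word.toList

-- ===== PRECONDITION & SPEC =====
def Spec_check_format (word : String) (out : Bool) : Prop := out = check_format_alt word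
instance (word : String) (out : Bool) : Decidable (Spec_check_format word out) := by unfold Spec_check_format; infer_instance

-- ===== CLAIM (what is proved, stated in full; the proofs are below) =====
def Claim_equal_check_format : Prop := ∀ (word : String), Dom_check_format word → Spec_check_format word (check_format word)

-- ===== LEMMAS AND PROOFS =====

-- shifting the start index by 2 past a prefix of two characters
theorem checkLoopA_shift2 (a b : Char) (cs : List Char) (i : Nat) :
    checkLoopA (a :: b :: cs) (i + 2) = checkLoopA cs i := by
  fun_induction checkLoopA cs i with
  | case1 i h hpar h2 =>
    rw [checkLoopA.eq_def, dif_pos (show i + 2 < (a :: b :: cs).length by simp; omega)]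
    simp only [show (a :: b :: cs)[i+2]'(by simp; omega) = cs[i] from by simp,
      show ((i+2) % 2 == 0) = (i % 2 == 0) from by simp, hpar, h2]
    simp
  | case2 i h hpar h2 ih =>
    rw [checkLoopA.eq_def, dif_pos (show i + 2 < (a :: b :: cs).length by simp; omega)]
    simp only [show (a :: b :: cs)[i+2]'(by simp; omega) = cs[i] from by simp,
      show ((i+2) % 2 == 0) = (i % 2 == 0) from by simp, hpar,
      if_neg h2, show i+2+1 = i+1+2 from by omega, ih]
    simp
  | case3 i h hpar h2 =>
    rw [checkLoopA.eq_def, dif_pos (show i + 2 < (a :: b :: cs).length by simp; omega)]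
    simp only [show (a :: b :: cs)[i+2]'(by simp; omega) = cs[i] from by simp,
      show ((i+2) % 2 == 0) = (i % 2 == 0) from by simp, if_neg hpar, h2]
    simp
  | case4 i h hpar h2 ih =>
    rw [checkLoopA.eq_def, dif_pos (show i + 2 < (a :: b :: cs).length by simp; omega)]
    simp only [show (a :: b :: cs)[i+2]'(by simp; omega) = cs[i] from by simp,
      show ((i+2) % 2 == 0) = (i % 2 == 0) from by simp, if_neg hpar,
      if_neg h2, show i+2+1 = i+1+2 from by omega, ih]
  | case5 i h =>
    rw [checkLoopA.eq_def, dif_neg (show ¬ i + 2 < (a :: b :: cs).length by simp; omega)]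

theorem checkLoopA_eq_okAlt (cs : List Char) : checkLoopA cs 0 = okAlt cs := by
  induction cs using okAlt.induct with
  | case1 => rw [checkLoopA.eq_def]; simp [okAlt]
  | case2 c =>
    rw [checkLoopA.eq_def, dif_pos (by simp)]
    by_cases h : PySem.Chars.isalpha c
    · rw [checkLoopA.eq_def, dif_neg (by simp)]
      simp [okAlt, h]
    · simp [okAlt, h]
  | case3 c d rest ih =>
    rw [checkLoopA.eq_def, dif_pos (by simp)]
    by_cases hc : PySem.Chars.isalpha c
    · rw [checkLoopA.eq_def, dif_pos (by simp)]
      by_cases hd : d = ' '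
      · simp only [okAlt, hc, hd]
        simp only [show (0:Nat)+1+1 = 0+2 from rfl, checkLoopA_shift2, ih]
        simp [hc]
      · simp [okAlt, hc, hd]
    · simp [okAlt, hc]

-- ===== VERDICT (by name: the statement is the Claim_ definition above) =====
theorem check_format_spec : Claim_equal_check_format := by
  intro word _
  unfold Spec_check_format check_format check_format_alt
  have hlen : PySem.Str.len word = word.length := by
    simp [PySem.Str.len]
  split_ifs with h
  · have h7 : ¬ word.length ≤ 7 := by omega
    simp [h7]
  · have h7 : word.length ≤ 7 := by omega
    simp [h7, checkLoopA_eq_okAlt]
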